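-- pv_equiv track=rewrite | github.com/saadoundhirat/LearningFolder | codechallenge/socuimtech.py | sum_seris_num
-- ===== SOURCE A (Python) =====
-- def sum_seris_num(arr):
--     output=[]
--     old = None
--     for num in arr:
--         if num == old:
--             output[len(output)-1]+=num
--         else:
--             output.append(num)
--             old= num
--     return output
-- ===== SOURCE B (Python) =====
-- def sum_seris_num(arr):
--     # Recursive run decomposition: split off the leading run of equal
--     # elements, reduce it with '+', and recurse on the remainder.
--     if not arr:
--         return []
--     i = 1
--     while i < len(arr) and arr[i] == arr[0]:
--         i += 1
--     total = arr[0]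
--     for x in arr[1:i]:
--         total += x
--     return [total] + sum_seris_num(arr[i:])
-- ===== Notes on version B (the rewrite author's own statement) =====
-- stated objective: alternative
-- what changed: B is a recursive run decomposition: it splits off the leading maximal run of equal elements, folds that run with '+', and recurses on the remaining suffix, instead of A's single scan that appends each element and mutates the list's last slot on repeats.
import Mathlib
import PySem

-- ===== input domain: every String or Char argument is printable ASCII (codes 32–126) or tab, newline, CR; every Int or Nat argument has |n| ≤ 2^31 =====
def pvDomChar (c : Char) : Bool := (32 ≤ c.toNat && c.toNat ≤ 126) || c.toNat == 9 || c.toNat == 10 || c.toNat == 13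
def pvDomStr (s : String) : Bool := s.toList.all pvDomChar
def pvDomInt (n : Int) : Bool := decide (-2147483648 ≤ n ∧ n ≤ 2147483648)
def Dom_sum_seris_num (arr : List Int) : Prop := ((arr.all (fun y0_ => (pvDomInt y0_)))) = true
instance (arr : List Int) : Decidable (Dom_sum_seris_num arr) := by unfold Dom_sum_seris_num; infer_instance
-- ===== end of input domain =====

-- B replaces A's append-then-mutate-last-slot scan by a recursive run decomposition
-- (split the leading run of equal elements, fold it with '+', recurse on the suffix);
-- objective: alternative.

-- ===== PORT A =====
-- A's state: (output, old : Option Int); `output[len(output)-1] += num` is get-then-set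
-- at index len-1; that branch is reached only with `output` nonempty (num == None is false
-- for ints), so the getD default 0 is never the returned value.
def sum_seris_num (arr : List Int) : List Int :=
  (arr.foldl
    (fun (st : List Int × Option Int) num =>
      let output := st.1
      let old := st.2
      if some num == old then
        (output.set (output.length - 1) (output.getD (output.length - 1) 0 + num), old)
      else
        (output ++ [num], some num))
    ([], none)).1

-- ===== PORT B =====
-- The leading-run `while` over arr[1:] is List.takeWhile / List.dropWhile on the tail;
-- the `for`-accumulation of the run is a foldl seeded with the head.
def sum_seris_num_alt : List Int → List Int
  | [] => []
  | a :: rest =>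
    ((rest.takeWhile (fun x => x == a)).foldl (· + ·) a)
      :: sum_seris_num_alt (rest.dropWhile (fun x => x == a))
termination_by arr => arr.length
decreasing_by
  simp only [List.length_cons]
  exact Nat.lt_succ_of_le (List.length_dropWhile_le _ _)

-- ===== PRECONDITION & SPEC =====
def Spec_sum_seris_num (arr : List Int) (out : List Int) : Prop := out = sum_seris_num_alt arr
instance (arr : List Int) (out : List Int) : Decidable (Spec_sum_seris_num arr out) := by unfold Spec_sum_seris_num; infer_instance

-- ===== CLAIM (what is proved, stated in full; the proofs are below) =====
def Claim_equal_sum_seris_num : Prop := ∀ (arr : List Int), Dom_sum_seris_num arr → Spec_sum_seris_num arr (sum_seris_num arr)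

-- ===== LEMMAS AND PROOFS =====

theorem pv_getD_last (out : List Int) (t : Int) : (out ++ [t]).getD out.length 0 = t := by
  induction out with
  | nil => rfl
  | cons x xs ih => simp [List.getD]

theorem pv_set_last (out : List Int) (t v : Int) : (out ++ [t]).set out.length v = out ++ [v] := by
  induction out with
  | nil => rfl
  | cons x xs ih => simp [ih]

theorem pv_key (rest out : List Int) (cur total : Int) :
    (rest.foldl
      (fun (st : List Int × Option Int) num =>
        let output := st.1
        let old := st.2
        if some num == old then
          (output.set (output.length - 1) (output.getD (output.length - 1) 0 + num), old)
        else
          (output ++ [num], some num))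
      (out ++ [total], some cur)).1
    =
    out ++ ((rest.takeWhile (fun x => x == cur)).foldl (· + ·) total)
      :: sum_seris_num_alt (rest.dropWhile (fun x => x == cur)) := by
  induction rest generalizing out cur total with
  | nil => simp [sum_seris_num_alt]
  | cons n rest ih =>
    by_cases h : n = cur
    · subst h
      have := ih out n (total + n)
      simp only [List.foldl, show (some n == some n) = true by simp,
        List.length_append, List.length_cons, List.length_nil, Nat.add_sub_cancel,
        pv_getD_last, pv_set_last] at this ⊢
      simpa [List.takeWhile, List.dropWhile] using this
    · have hb : (n == cur) = false := by simp [h]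
      simp only [List.foldl, show (some n == some cur) = false by simp [h]]
      have := ih (out ++ [total]) n n
      simp only [List.append_assoc, List.cons_append, List.nil_append] at this
      simpa [List.takeWhile, List.dropWhile, hb, sum_seris_num_alt] using this

theorem sum_seris_num_eq_alt (arr : List Int) : sum_seris_num arr = sum_seris_num_alt arr := by
  cases arr with
  | nil => simp [sum_seris_num, sum_seris_num_alt]
  | cons a rest =>
    show (rest.foldl _ ([] ++ [a], some a)).1 = _
    simpa [sum_seris_num_alt] using pv_key rest [] a a

-- ===== VERDICT (by name: the statement is the Claim_ definition above) =====
theorem sum_seris_num_spec : Claim_equal_sum_seris_num := by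
  intro arr _
  exact sum_seris_num_eq_alt arr
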